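-- pv_equiv track=rewrite | github.com/prokokok/programmers | 완전탐색/숫자야구.py | check_baseball
-- ===== SOURCE A (Python) =====
-- def check_baseball(q, s, b, all_permute):
--     new_list = []
--     for candidate in all_permute:
--         n_strike = 0
--         n_ball = 0
--         for index, number in enumerate(q):
--             if number in candidate:
--                 if candidate[index] == number:
--                     n_strike += 1
--                 else:
--                     n_ball += 1
--
--         if n_strike == s and n_ball == b:
--             new_list.append(candidate)
--
--     return new_list
-- ===== SOURCE B (Python) =====
-- def check_baseball(q, s, b, all_permute):
--     qcount = {}
--     for x in q:
--         qcount[x] = qcount.get(x, 0) + 1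
--     out = []
--     for cand in all_permute:
--         present = sum(qcount.get(v, 0) for v in set(cand))
--         strike = sum(1 for x, y in zip(q, cand) if x == y)
--         if strike == s and present - strike == b:
--             out.append(cand)
--     return out
-- ===== Notes on version B (the rewrite author's own statement) =====
-- stated objective: faster
-- what changed: A's inner accumulator loop with a linear membership scan and an index lookup per q element is replaced by a count dictionary of q built once before the loop plus a per-candidate set, so present is a dict-lookup sum over the candidate's distinct values and strike a zip scan, with balls derived as present - strike.
import Mathlib
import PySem

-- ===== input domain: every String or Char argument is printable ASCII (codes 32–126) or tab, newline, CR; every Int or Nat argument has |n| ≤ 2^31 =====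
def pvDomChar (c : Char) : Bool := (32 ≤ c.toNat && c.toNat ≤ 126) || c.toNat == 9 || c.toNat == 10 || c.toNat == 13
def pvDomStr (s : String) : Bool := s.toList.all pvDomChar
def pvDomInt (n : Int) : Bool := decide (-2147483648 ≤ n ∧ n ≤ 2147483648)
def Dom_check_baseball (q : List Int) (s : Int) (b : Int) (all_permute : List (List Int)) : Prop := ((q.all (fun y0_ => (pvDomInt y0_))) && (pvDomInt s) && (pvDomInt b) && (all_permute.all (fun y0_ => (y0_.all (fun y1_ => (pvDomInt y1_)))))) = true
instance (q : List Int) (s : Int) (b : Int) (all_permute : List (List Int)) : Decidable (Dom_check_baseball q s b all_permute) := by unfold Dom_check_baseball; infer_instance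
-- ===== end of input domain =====

set_option maxRecDepth 20000


-- B builds a count dictionary of q once, before the candidate loop, and a set per candidate,
-- replacing the per-element membership scan and index lookup of A's inner loop; balls are
-- derived as present - strike. A raises IndexError on candidates shorter than q whose missing
-- positions' q-values still occur in the candidate; those inputs are outside Pre_.

-- ===== PORT A =====
-- the inner 'for index, number in enumerate(q)' loop, carrying (n_strike, n_ball);
-- where Python's candidate[index] raises IndexError (pyGet? = none) the state is left
-- unchanged — such inputs are excluded by Pre_check_baseball.
def aLoop (cand : List Int) : List Int → Nat → Int × Int → Int × Int
  | [], _, st => st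
  | number :: rest, index, st =>
    aLoop cand rest (index + 1)
      (if number ∈ cand then
        match PySem.List.pyGet? cand (Int.ofNat index) with
        | some v => if v = number then (st.1 + 1, st.2) else (st.1, st.2 + 1)
        | none => st
      else st)

def check_baseball (q : List Int) (s : Int) (b : Int) (all_permute : List (List Int)) : List (List Int) :=
  all_permute.foldl (fun new_list candidate =>
    let st := aLoop candidate q 0 (0, 0)
    if st.1 = s ∧ st.2 = b then new_list ++ [candidate] else new_list) []

-- ===== PORT B =====
def check_baseball_alt (q : List Int) (s : Int) (b : Int) (all_permute : List (List Int)) : List (List Int) :=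
  let qcount : PySem.Dict Int Int :=
    q.foldl (fun d x => d.insert x (d.getD x 0 + 1)) PySem.Dict.empty
  all_permute.foldl (fun out cand =>
    let present : Int := ((PySem.Set.ofList cand).map (fun v => qcount.getD v 0)).sum
    let strike : Int := ((q.zip cand).map (fun p => if p.1 = p.2 then (1 : Int) else 0)).sum
    if strike = s ∧ present - strike = b then out ++ [cand] else out) []

-- ===== PRECONDITION & SPEC =====
-- Pre_ excludes exactly the inputs where A raises IndexError: a candidate shorter than q
-- with some q element past its length occurring in the candidate.
def Pre_check_baseball (q : List Int) (s : Int) (b : Int) (all_permute : List (List Int)) : Prop :=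
  ∀ cand ∈ all_permute, ∀ i, i < q.length → q.getD i 0 ∈ cand → i < cand.length
instance (q : List Int) (s : Int) (b : Int) (all_permute : List (List Int)) : Decidable (Pre_check_baseball q s b all_permute) := by unfold Pre_check_baseball; infer_instance

def pvWitness_check_baseball : List Int × Int × Int × List (List Int) :=
  ([1, 2, 3], 0, 0, [[1, 3, 2], [4, 5, 6], [1, 2, 3]])

def Spec_check_baseball (q : List Int) (s : Int) (b : Int) (all_permute : List (List Int)) (out : List (List Int)) : Prop := out = check_baseball_alt q s b all_permute
instance (q : List Int) (s : Int) (b : Int) (all_permute : List (List Int)) (out : List (List Int)) : Decidable (Spec_check_baseball q s b all_permute out) := by unfold Spec_check_baseball; infer_instance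

-- ===== CLAIM (what is proved, stated in full; the proofs are below) =====
def Claim_equal_check_baseball : Prop := ∀ (q : List Int) (s : Int) (b : Int) (all_permute : List (List Int)), Dom_check_baseball q s b all_permute → Pre_check_baseball q s b all_permute → Spec_check_baseball q s b all_permute (check_baseball q s b all_permute)

-- ===== LEMMAS AND PROOFS =====

-- A's inner loop, started at index i with admissible candidate, computes
-- (strikes over zip with the dropped candidate, memberships minus strikes), offset by the state.
lemma aLoop_eq (cand : List Int) :
    ∀ (q : List Int) (i : Nat) (st : Int × Int),
      (∀ j, (h : j < q.length) → q[j] ∈ cand → i + j < cand.length) →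
      aLoop cand q i st =
        (st.1 + ((q.zip (cand.drop i)).countP (fun p => p.1 = p.2) : Nat),
         st.2 + ((q.countP (fun x => decide (x ∈ cand)) : Nat)
                 - ((q.zip (cand.drop i)).countP (fun p => p.1 = p.2) : Nat))) := by
  intro q
  induction q with
  | nil => intro i st h; simp [aLoop]
  | cons n rest ih =>
    intro i st h
    have hrest : ∀ j, (hj : j < rest.length) → rest[j] ∈ cand → (i + 1) + j < cand.length := by
      intro j hj hm
      have := h (j + 1) (by simpa using Nat.succ_lt_succ hj) (by simpa using hm)
      omega
    by_cases hmem : n ∈ cand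
    · have hlt : i < cand.length := by
        have := h 0 (by simp) (by simpa using hmem); omega
      have hdrop : cand.drop i = cand[i] :: cand.drop (i + 1) :=
        List.drop_eq_getElem_cons hlt
      have hget : PySem.List.pyGet? cand (Int.ofNat i) = some cand[i] := by
        simpa using PySem.List.pyGet?_ofNat (xs := cand) (n := i) hlt
      by_cases heq : cand[i] = n
      · simp only [aLoop, hmem, if_pos, hget, heq, if_true]
        rw [ih (i + 1) _ hrest]
        simp [hdrop, heq, hmem]
        all_goals omega
      · simp only [aLoop, if_pos hmem, hget, if_neg heq]
        rw [ih (i + 1) _ hrest]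
        have hne : ¬ (n = cand[i]) := fun hc => heq hc.symm
        have hz : ((n :: rest).zip (cand.drop i)) = (n, cand[i]) :: rest.zip (cand.drop (i + 1)) := by
          rw [hdrop, List.zip_cons_cons]
        rw [hz, List.countP_cons, List.countP_cons]
        simp only [decide_eq_true_eq, hne, hmem, if_false, if_true, decide_true, decide_false]
        refine Prod.ext ?_ ?_ <;> simp <;> omega
    · simp only [aLoop, if_neg hmem]
      rw [ih (i + 1) _ hrest]
      have hcount : ((n :: rest).zip (cand.drop i)).countP (fun p => p.1 = p.2)
          = (rest.zip (cand.drop (i + 1))).countP (fun p => p.1 = p.2) := by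
        rcases Nat.lt_or_ge i cand.length with hlt | hge
        · have hdrop : cand.drop i = cand[i] :: cand.drop (i + 1) :=
            List.drop_eq_getElem_cons hlt
          have hne : ¬ (n = cand[i]) := fun hc => hmem (hc ▸ List.getElem_mem hlt)
          rw [hdrop, List.zip_cons_cons, List.countP_cons]
          simp [hne]
        · have h1 : cand.drop i = [] := List.drop_eq_nil_of_le hge
          have h2 : cand.drop (i + 1) = [] := List.drop_eq_nil_of_le (by omega)
          simp [h1, h2]
      simp [hcount, List.countP_cons, hmem]

-- Σ_{v ∈ S} [x = v] = [x ∈ S] for a duplicate-free S.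
lemma sum_ite_mem (x : Int) :
    ∀ (S : List Int), S.Nodup →
      (S.map (fun v => if x = v then (1 : Int) else 0)).sum = (if x ∈ S then (1 : Int) else 0) := by
  intro S
  induction S with
  | nil => simp
  | cons a S ih =>
    intro hnd
    have hnd' := (List.nodup_cons.mp hnd)
    by_cases hxa : x = a
    · subst hxa
      simp [List.sum_cons, ih hnd'.2, hnd'.1]
    · simp [List.sum_cons, hxa, ih hnd'.2]

-- Σ_{v ∈ S} count_q(v) = #{i : q[i] ∈ S} for a duplicate-free S.
lemma sum_count_eq_countP (S : List Int) (hnd : S.Nodup) :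
    ∀ (q : List Int),
      (S.map (fun v => (q.count v : Int))).sum = ((q.countP (fun x => decide (x ∈ S)) : Nat) : Int) := by
  intro q
  induction q with
  | nil => simp
  | cons x q ih =>
    have hsplit : (S.map (fun v => ((x :: q).count v : Int))).sum
        = (S.map (fun v => if x = v then (1 : Int) else 0)).sum
          + (S.map (fun v => (q.count v : Int))).sum := by
      rw [← List.sum_map_add]
      apply congrArg
      apply List.map_congr_left
      intro v _
      by_cases hv : x = v
      · simp [List.count_cons, hv]; ring
      · have : ¬ (v = x) := fun hc => hv hc.symm
        simp [List.count_cons, this, hv]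
    rw [hsplit, ih, sum_ite_mem x S hnd, List.countP_cons]
    by_cases hx : x ∈ S
    · simp only [hx, if_pos, decide_true, if_true]
      push_cast; ring
    · simp [hx]

-- the per-candidate body of B equals the per-candidate body of A.
lemma body_eq (q : List Int) (s b : Int) (cand : List Int)
    (h : ∀ i, (h : i < q.length) → q[i] ∈ cand → i < cand.length) (acc : List (List Int)) :
    (let st := aLoop cand q 0 (0, 0)
     if st.1 = s ∧ st.2 = b then acc ++ [cand] else acc) =
    (let present : Int := ((PySem.Set.ofList cand).map
        (fun v => (q.foldl (fun d x => d.insert x (d.getD x 0 + 1)) PySem.Dict.empty).getD v 0)).sum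
     let strike : Int := ((q.zip cand).map (fun p => if p.1 = p.2 then (1 : Int) else 0)).sum
     if strike = s ∧ present - strike = b then acc ++ [cand] else acc) := by
  have hA := aLoop_eq cand q 0 (0, 0) (by intro j hj hm; simpa using h j hj hm)
  have hstrike : ((q.zip cand).map (fun p => if p.1 = p.2 then (1 : Int) else 0)).sum
      = (((q.zip cand).countP (fun p => p.1 = p.2) : Nat) : Int) := by
    simpa using PySem.List.sum_map_ite_one_zero (xs := q.zip cand) (p := fun p => decide (p.1 = p.2))
  have hgetD : ∀ v : Int,
      (q.foldl (fun d x => d.insert x (d.getD x 0 + 1)) PySem.Dict.empty).getD v 0 = (q.count v : Int) := by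
    intro v
    have := PySem.Dict.getD_foldl_insert_add_one (l := q) (d := PySem.Dict.empty) (v := v)
    simpa using this
  have hpresent : ((PySem.Set.ofList cand).map
      (fun v => (q.foldl (fun d x => d.insert x (d.getD x 0 + 1)) PySem.Dict.empty).getD v 0)).sum
      = ((q.countP (fun x => decide (x ∈ cand)) : Nat) : Int) := by
    have h1 : ((PySem.Set.ofList cand).map
        (fun v => (q.foldl (fun d x => d.insert x (d.getD x 0 + 1)) PySem.Dict.empty).getD v 0)).sum
        = ((PySem.Set.ofList cand).map (fun v => (q.count v : Int))).sum := by
      apply congrArg; exact List.map_congr_left (fun v _ => hgetD v)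
    rw [h1, sum_count_eq_countP (PySem.Set.ofList cand) (PySem.Set.nodup_ofList cand) q]
    have : List.countP (fun x => decide (x ∈ PySem.Set.ofList cand)) q
        = List.countP (fun x => decide (x ∈ cand)) q :=
      List.countP_congr (fun x _ => by simp [PySem.Set.mem_ofList])
    rw [this]
  simp only [hA, hstrike, hpresent, List.drop_zero]
  simp only [Int.zero_add]

lemma fold_eq (q : List Int) (s b : Int) :
    ∀ (ap : List (List Int)) (acc : List (List Int)),
      (∀ cand ∈ ap, ∀ i, (h : i < q.length) → q[i] ∈ cand → i < cand.length) →
      ap.foldl (fun new_list candidate =>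
        let st := aLoop candidate q 0 (0, 0)
        if st.1 = s ∧ st.2 = b then new_list ++ [candidate] else new_list) acc =
      ap.foldl (fun out cand =>
        let present : Int := ((PySem.Set.ofList cand).map
            (fun v => (q.foldl (fun d x => d.insert x (d.getD x 0 + 1)) PySem.Dict.empty).getD v 0)).sum
        let strike : Int := ((q.zip cand).map (fun p => if p.1 = p.2 then (1 : Int) else 0)).sum
        if strike = s ∧ present - strike = b then out ++ [cand] else out) acc := by
  intro ap
  induction ap with
  | nil => intro acc _; rfl
  | cons c rest ih =>
    intro acc hpre
    simp only [List.foldl_cons]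
    rw [body_eq q s b c (hpre c (by simp)) acc]
    exact ih _ (fun cand hc => hpre cand (by simp [hc]))

-- ===== VERDICT (by name: the statement is the Claim_ definition above) =====
theorem check_baseball_spec : Claim_equal_check_baseball := by
  intro q s b ap _ hpre
  unfold Spec_check_baseball check_baseball check_baseball_alt
  exact fold_eq q s b ap [] (fun cand hc i hi hm =>
    hpre cand hc i hi (by rwa [List.getD_eq_getElem q 0 hi]))
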